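-- pv_equiv track=rewrite | github.com/MaxKHK/CodilityLessons | 11---Fibonacci-numbers/FibFrog.py | solution
-- ===== SOURCE A (Python) =====
-- def solution(A):
--     #let's assume that our last position is a shore
--     #to maike algo slightly simpler
--     A.append(1)
--     #we need tfibo numbers less than that one
--     N = len(A)
--
--     #our fib numbers array
--     fibNumbers = [0,1]
--     #generate fibonacci numbers
--     while fibNumbers[-1]<=N:
--         fibNumbers.append(fibNumbers[-1] + fibNumbers[-2])
--
--     #last element will be bigger than N, remove it
--     del(fibNumbers[-1])
--
--     #also drop first element (it is 0 - and we can't jump on length of 0)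
--     del(fibNumbers[0])
--
--     #ok, fine, we have our map of possible jumps. Now let's
--     #build a map of reachability - which position
--     #in how many jumps we can get
--     #-1 means not reachable, else we have number of jumps needed
--     reachabilityMap = [-1] * N
--
--     #ok, we make a first jump from a shore so lets map the leafs we can reach during first jump
--     #and put 1 there - which means we get there in 1 jump
--     for jump in fibNumbers:
--         if A[jump-1] == 1:
--             reachabilityMap[jump-1] = 1
--
--     #now go over each leaf in the A array
--     for i in range(0,len(A)):
--         #we ignore positions where we have no leaf
--         #and already discovered path
--         if A[i] == 0 or reachabilityMap[i] > 0:
--             continue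
--         #the index of an optimal leaf from which to jump to current position
--         minIndex = -1
--         #the amount of jumps made to reach the leaf minIndex (the optimal so far)
--         #by default - even longer than river itself
--         minValue = N+1
--
--         #now check each possible jump and see where it leads us
--         for jump in fibNumbers:
--             #th position from which we could have jumped to current position
--             previousLeaf = i - jump
--             #we are beyond the left shore - jump is too big
--             if previousLeaf < 0:
--                 break
--             #if there is a leaf in that position
--             #and it can be reached in less than current best position
--             #we record that this currently best option we have
--             if reachabilityMap[previousLeaf] > 0 and reachabilityMap[previousLeaf] < minValue:
--                 minValue = reachabilityMap[previousLeaf]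
--                 minIndex = previousLeaf
--
--         #ok, we checked all the possible jumps.
--         #what we have? If we found any optimal jump
--         #let's record it
--         if minIndex>-1:
--             reachabilityMap[i] = minValue+1
--
--
--
--     #after we checked each leaf - return the optimal value for last leaf (which we placed
--     #on right shore)
--
--     return reachabilityMap[-1]
-- ===== SOURCE B (Python) =====
-- def solution(A):
--     # Forward "push" relaxation over a distance dict (keyed by position, shore = -1),
--     # instead of A's seeded array + backward pull with min/argmin tracking.
--     # Landability mirrors the original semantics: a jump from the shore may land only
--     # on value 1; a jump from a leaf may land on any non-zero value.
--     A.append(1)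
--     N = len(A)
--     fibs = []
--     x, y = 1, 2
--     while x <= N:
--         fibs.append(x)
--         x, y = y, x + y
--     best = {-1: 0}
--     for i in range(-1, N):
--         if i not in best:
--             continue
--         c = best[i] + 1
--         for j in fibs:
--             k = i + j
--             if k >= N:
--                 break
--             land = A[k] == 1 if i < 0 else A[k] != 0
--             if land and (k not in best or c < best[k]):
--                 best[k] = c
--     return best.get(N - 1, -1)
-- ===== Notes on version B (the rewrite author's own statement) =====
-- stated objective: faster
-- what changed: Replaces A's seeded reachability array with per-cell backward pull (min/argmin scan over Fibonacci predecessors for every leaf cell, plus a separate shore-seeding loop) by a single forward pass that push-relaxes Fibonacci successors into a distance dictionary keyed by position, the shore being key -1.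
import Mathlib
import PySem

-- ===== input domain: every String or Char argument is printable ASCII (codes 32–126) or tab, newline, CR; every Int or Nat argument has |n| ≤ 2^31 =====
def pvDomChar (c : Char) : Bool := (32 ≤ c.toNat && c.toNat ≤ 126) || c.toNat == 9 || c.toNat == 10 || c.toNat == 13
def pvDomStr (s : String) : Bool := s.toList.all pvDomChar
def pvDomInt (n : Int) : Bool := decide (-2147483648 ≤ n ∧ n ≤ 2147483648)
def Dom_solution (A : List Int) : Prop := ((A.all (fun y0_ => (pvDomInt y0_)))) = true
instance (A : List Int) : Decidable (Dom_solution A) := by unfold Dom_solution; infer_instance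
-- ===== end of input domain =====

-- B: forward push-relaxation into a distance dict (shore = key -1) instead of A's seeded
-- array + per-cell backward min/argmin pull; same return value (both append 1 to A in Python).


-- ===== PORT A =====
-- Python: fibNumbers = [0,1]; while fibNumbers[-1] <= N: append last+penult.
-- (a, b) are the last two elements; the 'b = 0' branch is a pure totality guard,
-- never reached from the initial call (0, 1) since b stays ≥ 1.
def fibGen (N : Int) (a b : Nat) : List Int :=
  if b = 0 then []
  else if (b : Int) ≤ N then ((a : Int) + (b : Int)) :: fibGen N b (a + b)
  else []
termination_by ((N + 1).toNat - b, (N + 1).toNat - a)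
decreasing_by
  by_cases ha : a = 0
  · subst ha; simp only [Nat.zero_add]; right; omega
  · left; omega

-- inner 'for jump in fibNumbers' of the second loop, with its break and (minIndex, minValue)
def pullLoop (r : List Int) (i : Int) (mi mv : Int) : List Int → Int × Int
  | [] => (mi, mv)
  | j :: rest =>
    if i - j < 0 then (mi, mv)
    else if PySem.List.pyGetD r (i - j) 0 > 0 ∧ PySem.List.pyGetD r (i - j) 0 < mv then
      pullLoop r i (i - j) (PySem.List.pyGetD r (i - j) 0) rest
    else pullLoop r i mi mv rest

def solution (A : List Int) : Int :=
  let A' := A ++ [1]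
  let N : Int := A'.length
  let fibNumbers : List Int := [0, 1] ++ fibGen N 0 1
  let fibNumbers := fibNumbers.dropLast        -- del fibNumbers[-1]
  let fibNumbers := fibNumbers.drop 1          -- del fibNumbers[0]
  let r0 : List Int := List.replicate A'.length (-1)
  let r1 := fibNumbers.foldl
    (fun r j => if PySem.List.pyGetD A' (j - 1) 0 = 1 then r.set (j - 1).toNat 1 else r) r0
  let r2 := (PySem.List.pyRange 0 N 1).foldl (fun r i =>
      if PySem.List.pyGetD A' i 0 = 0 ∨ PySem.List.pyGetD r i 0 > 0 then r
      else if (pullLoop r i (-1) (N + 1) fibNumbers).1 > -1 then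
        r.set i.toNat ((pullLoop r i (-1) (N + 1) fibNumbers).2 + 1)
      else r) r1
  PySem.List.pyGetD r2 (-1) 0

-- ===== PORT B =====
-- Python: x, y = 1, 2; while x <= N: fibs.append(x); x, y = y, x + y.
-- The 'x < y' test is a pure totality guard, never false from the initial call (1, 2).
def fibGenB (N : Int) (x y : Nat) : List Int :=
  if (x : Int) ≤ N then
    if x < y then (x : Int) :: fibGenB N y (x + y) else []
  else []
termination_by (N + 1).toNat - x
decreasing_by omega

-- inner 'for j in fibs' push loop, with its break; c = best[i] + 1
def pushLoop (A' : List Int) (N : Int) (i c : Int) (d : PySem.Dict Int Int) :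
    List Int → PySem.Dict Int Int
  | [] => d
  | j :: rest =>
    if i + j ≥ N then d
    else if ((if i < 0 then PySem.List.pyGetD A' (i + j) 0 == 1
              else PySem.List.pyGetD A' (i + j) 0 != 0) &&
             (match d.get? (i + j) with | none => true | some v => decide (c < v))) then
      pushLoop A' N i c (d.insert (i + j) c) rest
    else
      pushLoop A' N i c d rest

def solution_alt (A : List Int) : Int :=
  let A' := A ++ [1]
  let N : Int := A'.length
  let fibs := fibGenB N 1 2
  let d0 : PySem.Dict Int Int := PySem.Dict.ofList [(-1, 0)]
  let dF := (PySem.List.pyRange (-1) N 1).foldl (fun d i =>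
      match d.get? i with
      | none => d
      | some bi => pushLoop A' N i (bi + 1) d fibs) d0
  (dF.get? (N - 1)).getD (-1)

-- ===== PRECONDITION & SPEC =====
def Spec_solution (A : List Int) (out : Int) : Prop := out = solution_alt A
instance (A : List Int) (out : Int) : Decidable (Spec_solution A out) := by unfold Spec_solution; infer_instance

-- ===== CLAIM (what is proved, stated in full; the proofs are below) =====
def Claim_equal_solution : Prop := ∀ (A : List Int), Dom_solution A → Spec_solution A (solution A)

-- ===== LEMMAS AND PROOFS =====

-- the reference value: minimal-jump value of cell k (A's reachabilityMap semantics):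
-- 1 if directly seeded from the shore; otherwise 1 + min over positive values of
-- Fibonacci predecessors; -1 if unreachable (or A'[k] = 0).
def specF (A' : List Int) (fibs : List Int) (k : Nat) : Int :=
  if A'.getD k 0 = 1 ∧ ((k : Int) + 1) ∈ fibs then 1
  else if A'.getD k 0 = 0 then -1
  else
    match (fibs.filterMap (fun j =>
      if h : 1 ≤ j ∧ j ≤ (k : Int) then
        let v := specF A' fibs (k - j.toNat)
        if 0 < v then some v else none
      else none)).min? with
    | some m => m + 1
    | none => -1
termination_by k
decreasing_by omega

-- candidate list of cell k (over an arbitrary jump list L)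
def cl (A' fibs L : List Int) (k : Nat) : List Int :=
  L.filterMap (fun j =>
    if 1 ≤ j ∧ j ≤ (k : Int) then
      let v := specF A' fibs (k - j.toNat)
      if 0 < v then some v else none
    else none)

theorem specF_eq (A' fibs : List Int) (k : Nat) :
    specF A' fibs k =
      if A'.getD k 0 = 1 ∧ ((k : Int) + 1) ∈ fibs then 1
      else if A'.getD k 0 = 0 then -1
      else
        match (cl A' fibs fibs k).min? with
        | some m => m + 1
        | none => -1 := by
  have h : (fibs.filterMap (fun j =>
      if h : 1 ≤ j ∧ j ≤ (k : Int) then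
        let v := specF A' fibs (k - j.toNat)
        if 0 < v then some v else none
      else none)) = cl A' fibs fibs k := by
    rw [cl]
    apply List.filterMap_congr
    intro j _
    simp only [dite_eq_ite]
  rw [specF, h]

-- fib-list lemmas ------------------------------------------------------------
theorem fibGenB_mem {N : Int} (x y : Nat) (j : Int) (hj : j ∈ fibGenB N x y) :
    (x : Int) ≤ j ∧ j ≤ N := by
  induction x, y using fibGenB.induct N with
  | case1 x y hx hxy ih =>
    rw [fibGenB, if_pos hx, if_pos hxy] at hj
    rcases List.mem_cons.mp hj with h | h
    · omega
    · have := ih h; omega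
  | case2 x y hx hxy =>
    rw [fibGenB, if_pos hx, if_neg hxy] at hj
    simp at hj
  | case3 x y hx =>
    rw [fibGenB, if_neg hx] at hj
    simp at hj

theorem fibGenB_sorted {N : Int} (x y : Nat) :
    (fibGenB N x y).Pairwise (· < ·) := by
  induction x, y using fibGenB.induct N with
  | case1 x y hx hxy' ih =>
    rw [fibGenB, if_pos hx, if_pos hxy']
    refine List.pairwise_cons.mpr ⟨?_, ih⟩
    intro j hj
    have := fibGenB_mem y (x + y) j hj
    omega
  | case2 x y hx hxy' =>
    rw [fibGenB, if_pos hx, if_neg hxy']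
    exact List.Pairwise.nil
  | case3 x y hx =>
    rw [fibGenB, if_neg hx]
    exact List.Pairwise.nil

theorem one_mem_fibGenB {N : Int} (hN : 1 ≤ N) : (1 : Int) ∈ fibGenB N 1 2 := by
  rw [fibGenB, if_pos (by push_cast; omega), if_pos (by omega)]
  simp

theorem fibGen_ne_nil {N : Int} (a b : Nat) (hb : b ≠ 0) (hbN : (b : Int) ≤ N) :
    fibGen N a b ≠ [] := by
  rw [fibGen, if_neg hb, if_pos hbN]
  simp

theorem dropLast_fibGen {N : Int} (a b : Nat) (hb : b ≠ 0) :
    (fibGen N a b).dropLast = fibGenB N (a + b) (a + b + b) := by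
  induction a, b using fibGen.induct N with
  | case1 b => omega
  | case2 a b hb' hbN ih =>
    rw [fibGen, if_neg hb', if_pos hbN]
    by_cases h2 : ((a + b : Nat) : Int) ≤ N
    · have hne : fibGen N b (a + b) ≠ [] := fibGen_ne_nil b (a + b) (by omega) h2
      rw [List.dropLast_cons_of_ne_nil hne, ih (by omega)]
      have e1 : b + (a + b) = a + b + b := by omega
      rw [e1]
      have e2 : a + b + b + (a + b) = (a + b) + (a + b + b) := by omega
      rw [e2]
      conv_rhs => rw [fibGenB, if_pos h2, if_pos (by omega : a + b < a + b + b)]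
      push_cast
      ring_nf
    · rw [fibGen, if_neg (by omega : ¬ a + b = 0), if_neg h2]
      rw [fibGenB, if_neg h2]
      rfl
  | case3 a b hb' hbN =>
    rw [fibGen, if_neg hb', if_neg hbN]
    rw [fibGenB, if_neg (by push_cast; omega)]
    rfl

theorem fibsA_eq {N : Int} (hN : 1 ≤ N) :
    ((([0, 1] ++ fibGen N 0 1).dropLast).drop 1 : List Int) = 1 :: fibGenB N 1 2 := by
  have hne : fibGen N 0 1 ≠ [] := fibGen_ne_nil 0 1 (by omega) (by omega)
  have : ([0, 1] ++ fibGen N 0 1 : List Int) = 0 :: 1 :: fibGen N 0 1 := rfl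
  rw [this, List.dropLast_cons₂, List.dropLast_cons_of_ne_nil hne, List.drop_one]
  have := dropLast_fibGen (N := N) 0 1 (by omega)
  simpa using this

-- membership in the candidate list
theorem mem_cl {A' fibs L : List Int} {k : Nat} {v : Int} :
    v ∈ cl A' fibs L k ↔
      ∃ j ∈ L, 1 ≤ j ∧ j ≤ (k : Int) ∧ 0 < specF A' fibs (k - j.toNat) ∧
        v = specF A' fibs (k - j.toNat) := by
  constructor
  · intro hv
    rcases List.mem_filterMap.mp hv with ⟨j, hj, hjv⟩
    by_cases h : 1 ≤ j ∧ j ≤ (k : Int)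
    · rw [if_pos h] at hjv
      simp only at hjv
      by_cases hp : 0 < specF A' fibs (k - j.toNat)
      · rw [if_pos hp] at hjv
        exact ⟨j, hj, h.1, h.2, hp, (Option.some.injEq _ _ ▸ hjv).symm⟩
      · rw [if_neg hp] at hjv; cases hjv
    · rw [if_neg h] at hjv; cases hjv
  · rintro ⟨j, hj, h1, h2, hp, rfl⟩
    refine List.mem_filterMap.mpr ⟨j, hj, ?_⟩
    rw [if_pos ⟨h1, h2⟩]
    simp only [if_pos hp]

-- specF only takes the value -1 or values ≥ 1
theorem specF_cases (A' fibs : List Int) (k : Nat) :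
    specF A' fibs k = -1 ∨ 1 ≤ specF A' fibs k := by
  rw [specF_eq]
  split_ifs with h1 h2
  · right; omega
  · left; rfl
  · rcases hm : (cl A' fibs fibs k).min? with _ | m
    · left; rfl
    · right
      have hmem := List.min?_mem hm
      rcases mem_cl.mp hmem with ⟨j, _, _, _, hp, hv⟩
      show (1 : Int) ≤ m + 1
      omega

-- each value is at most position + 1
theorem specF_le (A' fibs : List Int) (k : Nat) : specF A' fibs k ≤ (k : Int) + 1 := by
  induction k using Nat.strong_induction_on with
  | _ k ih =>
    rw [specF_eq]
    split_ifs with h1 h2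
    · omega
    · omega
    · rcases hm : (cl A' fibs fibs k).min? with _ | m
      · show (-1 : Int) ≤ (k : Int) + 1
        omega
      · have hmem := List.min?_mem hm
        rcases mem_cl.mp hmem with ⟨j, _, hj1, hj2, hp, hv⟩
        have hlt : k - j.toNat < k := by omega
        have hle := ih _ hlt
        show m + 1 ≤ (k : Int) + 1
        rw [hv] at *
        omega

-- min?/foldl-min bridges
theorem foldl_min_dup (v mv : Int) (t : List Int) :
    List.foldl min mv (v :: v :: t) = List.foldl min mv (v :: t) := by
  simp only [List.foldl_cons, min_assoc, min_self]

theorem foldl_min_of_big (mv : Int) (l : List Int) (hne : l ≠ [])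
    (hbig : ∀ v ∈ l, v < mv) :
    some (List.foldl min mv l) = l.min? := by
  cases l with
  | nil => cases hne rfl
  | cons x t =>
    rw [List.min?_cons']
    have hx : min mv x = x := min_eq_right (le_of_lt (hbig x (by simp)))
    rw [List.foldl_cons, hx]

-- a getD/set working lemma
theorem getD_set_ite (r : List Int) (m k : Nat) (v d : Int) (hm : m < r.length) :
    (r.set m v).getD k d = if k = m then v else r.getD k d := by
  by_cases h : k = m
  · subst h
    rw [if_pos rfl, List.getD_eq_getElem?_getD, List.getElem?_set_self', List.getElem?_eq_getElem hm]
    rfl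
  · rw [if_neg h, List.getD_eq_getElem?_getD, List.getElem?_set_ne (by omega), ← List.getD_eq_getElem?_getD]

-- ===== loop 1 (shore seeding) =====
theorem seed_foldl_length (A' L : List Int) (r : List Int) :
    (L.foldl (fun r j =>
      if PySem.List.pyGetD A' (j - 1) 0 = 1 then r.set (j - 1).toNat 1 else r) r).length
    = r.length := by
  induction L generalizing r with
  | nil => rfl
  | cons j L' ih =>
    rw [List.foldl_cons, ih]
    split_ifs <;> simp

theorem seed_foldl_getD (A' L : List Int)
    (hL : ∀ j ∈ L, 1 ≤ j ∧ j ≤ (A'.length : Int)) (r : List Int)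
    (hr : r.length = A'.length) (k : Nat) (hk : k < A'.length) :
    (L.foldl (fun r j =>
      if PySem.List.pyGetD A' (j - 1) 0 = 1 then r.set (j - 1).toNat 1 else r) r).getD k 0
    = if ((k : Int) + 1) ∈ L ∧ A'.getD k 0 = 1 then 1 else r.getD k 0 := by
  induction L generalizing r with
  | nil => simp
  | cons j L' ih =>
    have hj := hL j (by simp)
    rw [List.foldl_cons, ih (fun x hx => hL x (by simp [hx])) _ (by split_ifs <;> simp [hr])]
    rw [PySem.List.pyGetD_of_nonneg A' 0 (by omega)]
    by_cases hjk : j = (k : Int) + 1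
    · have hnat : (j - 1).toNat = k := by omega
      rw [hnat]
      by_cases hav : A'.getD k 0 = 1
      · simp only [if_pos hav]
        rw [getD_set_ite _ _ _ _ _ (by omega)]
        have hm : ((k : Int) + 1) ∈ j :: L' := by simp [hjk]
        rw [if_pos (rfl : k = k), ite_self, if_pos ⟨hm, hav⟩]
      · simp only [if_neg hav]
        rw [if_neg (fun h => hav h.2), if_neg (fun h => hav h.2)]
    · have hmem : (((k : Int) + 1) ∈ j :: L') ↔ (((k : Int) + 1) ∈ L') := by
        simp only [List.mem_cons]
        constructor
        · rintro (h | h)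
          · exact absurd h.symm hjk
          · exact h
        · exact Or.inr
      simp only [hmem]
      split_ifs with hc hset
      · rfl
      · rw [getD_set_ite _ _ _ _ _ (by omega), if_neg (by omega)]
      · rfl

-- ===== loop 2 inner pull =====
-- candidates as read from the array r at position i
def pc (r : List Int) (i : Int) (L : List Int) : List Int :=
  L.filterMap (fun j =>
    if 0 ≤ i - j then
      (if 0 < PySem.List.pyGetD r (i - j) 0 then some (PySem.List.pyGetD r (i - j) 0) else none)
    else none)

theorem pc_nil_of_lt (r : List Int) (i : Int) (L : List Int)
    (h : ∀ j ∈ L, i - j < 0) : pc r i L = [] := by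
  rw [pc, List.filterMap_eq_nil_iff]
  intro j hj
  rw [if_neg (by have := h j hj; omega)]

theorem pull_snd (r : List Int) (i : Int) (L : List Int) (hL : L.Pairwise (· ≤ ·)) :
    ∀ mi mv : Int, (pullLoop r i mi mv L).2 = (pc r i L).foldl min mv := by
  induction L with
  | nil => intro mi mv; simp [pullLoop, pc]
  | cons j rest ih =>
    intro mi mv
    have hrest : rest.Pairwise (· ≤ ·) := (List.pairwise_cons.mp hL).2
    have hjle : ∀ j' ∈ rest, j ≤ j' := (List.pairwise_cons.mp hL).1
    rw [pullLoop]
    by_cases hbr : i - j < 0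
    · rw [if_pos hbr]
      have : pc r i (j :: rest) = [] := by
        apply pc_nil_of_lt
        intro j' hj'
        rcases List.mem_cons.mp hj' with h | h
        · omega
        · have := hjle j' h; omega
      rw [this]
      rfl
    · rw [if_neg hbr]
      have hpc : pc r i (j :: rest) =
          (if 0 < PySem.List.pyGetD r (i - j) 0 then [PySem.List.pyGetD r (i - j) 0] else []) ++ pc r i rest := by
        rw [pc, List.filterMap_cons]
        split_ifs with h0 h1 <;>
          first
          | rfl
          | exact absurd (by omega : (0:Int) ≤ i - j) h0
      rw [hpc]
      by_cases h1 : 0 < PySem.List.pyGetD r (i - j) 0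
      · rw [if_pos h1]
        by_cases h2 : PySem.List.pyGetD r (i - j) 0 < mv
        · rw [if_pos ⟨h1, h2⟩, ih hrest]
          simp only [List.singleton_append, List.foldl_cons]
          rw [min_eq_right (le_of_lt h2)]
        · rw [if_neg (by omega), ih hrest]
          simp only [List.singleton_append, List.foldl_cons]
          rw [min_eq_left (by omega)]
      · rw [if_neg h1, if_neg (by omega), ih hrest]
        rfl

theorem pull_fst_ge (r : List Int) (i : Int) (L : List Int) :
    ∀ mi mv : Int, 0 ≤ mi → 0 ≤ (pullLoop r i mi mv L).1 := by
  induction L with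
  | nil => intro mi mv h; simpa [pullLoop] using h
  | cons j rest ih =>
    intro mi mv h
    rw [pullLoop]
    split_ifs with h1 h2
    · exact h
    · exact ih _ _ (by omega)
    · exact ih _ _ h

theorem pull_no (r : List Int) (i : Int) (L : List Int) (hL : L.Pairwise (· ≤ ·)) :
    ∀ mi mv : Int, (∀ v ∈ pc r i L, mv ≤ v) → pullLoop r i mi mv L = (mi, mv) := by
  induction L with
  | nil => intro mi mv _; rfl
  | cons j rest ih =>
    intro mi mv h
    have hrest : rest.Pairwise (· ≤ ·) := (List.pairwise_cons.mp hL).2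
    rw [pullLoop]
    by_cases hbr : i - j < 0
    · rw [if_pos hbr]
    · rw [if_neg hbr]
      have hmemv : 0 < PySem.List.pyGetD r (i - j) 0 →
          PySem.List.pyGetD r (i - j) 0 ∈ pc r i (j :: rest) := by
        intro h0
        rw [pc, List.filterMap_cons, if_pos (by omega : (0:Int) ≤ i - j), if_pos h0]
        simp
      have hsub : ∀ w ∈ pc r i rest, mv ≤ w := by
        intro w hw
        apply h
        rw [pc, List.filterMap_cons]
        split_ifs <;> simp [pc] at hw ⊢ <;> tauto
      by_cases h1 : 0 < PySem.List.pyGetD r (i - j) 0 ∧ PySem.List.pyGetD r (i - j) 0 < mv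
      · exact absurd (h _ (hmemv h1.1)) (by omega)
      · rw [if_neg h1]
        exact ih hrest _ _ hsub

theorem pull_yes (r : List Int) (i : Int) (L : List Int) (hL : L.Pairwise (· ≤ ·)) :
    ∀ mi mv : Int, (∃ v ∈ pc r i L, v < mv) → 0 ≤ (pullLoop r i mi mv L).1 := by
  induction L with
  | nil => rintro mi mv ⟨v, hv, _⟩; simp [pc] at hv
  | cons j rest ih =>
    rintro mi mv ⟨v0, hv0, hlt⟩
    have hrest : rest.Pairwise (· ≤ ·) := (List.pairwise_cons.mp hL).2
    have hjle : ∀ j' ∈ rest, j ≤ j' := (List.pairwise_cons.mp hL).1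
    rw [pullLoop]
    by_cases hbr : i - j < 0
    · exfalso
      have : pc r i (j :: rest) = [] := by
        apply pc_nil_of_lt
        intro j' hj'
        rcases List.mem_cons.mp hj' with h | h
        · omega
        · have := hjle j' h; omega
      rw [this] at hv0
      simp at hv0
    · rw [if_neg hbr]
      have hpc : pc r i (j :: rest) =
          (if 0 < PySem.List.pyGetD r (i - j) 0 then [PySem.List.pyGetD r (i - j) 0] else []) ++ pc r i rest := by
        rw [pc, List.filterMap_cons]
        split_ifs with h0 h1 <;>
          first
          | rfl
          | exact absurd (by omega : (0:Int) ≤ i - j) h0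
      by_cases h1 : 0 < PySem.List.pyGetD r (i - j) 0 ∧ PySem.List.pyGetD r (i - j) 0 < mv
      · rw [if_pos h1]
        exact pull_fst_ge _ _ _ _ _ (by omega)
      · rw [if_neg h1]
        apply ih hrest
        refine ⟨v0, ?_, hlt⟩
        rw [hpc] at hv0
        rcases List.mem_append.mp hv0 with h | h
        · exfalso
          split_ifs at h with h0
          · simp at h
            omega
          · simp at h
        · exact h

-- seed value of a cell (state of the array after loop 1)
def seedV (A' fibs : List Int) (k : Nat) : Int :=
  if A'.getD k 0 = 1 ∧ ((k : Int) + 1) ∈ fibs then 1 else -1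

theorem cl_cons_one (A' fibs T : List Int) (k : Nat) (mv : Int) :
    List.foldl min mv (cl A' fibs (1 :: 1 :: T) k) = List.foldl min mv (cl A' fibs (1 :: T) k) := by
  rw [cl, cl, List.filterMap_cons, List.filterMap_cons]
  rcases h : (if (1:Int) ≤ 1 ∧ (1:Int) ≤ (k : Int) then
      (if 0 < specF A' fibs (k - (1:Int).toNat) then some (specF A' fibs (k - (1:Int).toNat)) else none)
    else none) with _ | v
  · rfl
  · exact foldl_min_dup v mv _

theorem cl_cons_one_nil (A' fibs T : List Int) (k : Nat)
    (h : cl A' fibs (1 :: T) k = []) : cl A' fibs (1 :: 1 :: T) k = [] := by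
  have h1 : (if (1:Int) ≤ 1 ∧ (1:Int) ≤ (k : Int) then
      (if 0 < specF A' fibs (k - (1:Int).toNat) then some (specF A' fibs (k - (1:Int).toNat)) else none)
    else none) = none := by
    have := List.filterMap_eq_nil_iff.mp h
    exact this 1 (by simp)
  rw [cl, List.filterMap_cons]
  simp only [h1]
  exact h

theorem pc_eq_cl (A' fibs L : List Int) (r : List Int) (k : Nat)
    (hL : ∀ j ∈ L, 1 ≤ j)
    (hmatch : ∀ p, p < k → r.getD p 0 = specF A' fibs p) :
    pc r (k : Int) L = cl A' fibs L k := by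
  rw [pc, cl]
  apply List.filterMap_congr
  intro j hj
  have hj1 := hL j hj
  by_cases hjk : j ≤ (k : Int)
  · have hnn : (0:Int) ≤ (k : Int) - j := by omega
    have heq : ((k : Int) - j).toNat = k - j.toNat := by omega
    have hval : PySem.List.pyGetD r ((k : Int) - j) 0 = specF A' fibs (k - j.toNat) := by
      rw [PySem.List.pyGetD_of_nonneg r 0 hnn, heq, hmatch _ (by omega)]
    rw [hval, if_pos hnn, if_pos (show 1 ≤ j ∧ j ≤ (k : Int) from ⟨hj1, hjk⟩)]
  · rw [if_neg (by omega), if_neg (by omega)]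

theorem loop2_inv (A' : List Int) (hA : A'.length ≠ 0) (r1 : List Int)
    (hlen : r1.length = A'.length)
    (hseed : ∀ k, k < A'.length →
      r1.getD k 0 = seedV A' (fibGenB (A'.length : Int) 1 2) k)
    (i : Nat) (hi : i ≤ A'.length) :
    ((PySem.List.pyRange 0 (i : Int) 1).foldl
      (fun r i =>
        if PySem.List.pyGetD A' i 0 = 0 ∨ PySem.List.pyGetD r i 0 > 0 then r
        else if (pullLoop r i (-1) ((A'.length : Int) + 1)
            (1 :: fibGenB (A'.length : Int) 1 2)).1 > -1 then
          r.set i.toNat ((pullLoop r i (-1) ((A'.length : Int) + 1)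
            (1 :: fibGenB (A'.length : Int) 1 2)).2 + 1)
        else r) r1).length = A'.length ∧
    ∀ k, k < A'.length →
      ((PySem.List.pyRange 0 (i : Int) 1).foldl
        (fun r i =>
          if PySem.List.pyGetD A' i 0 = 0 ∨ PySem.List.pyGetD r i 0 > 0 then r
          else if (pullLoop r i (-1) ((A'.length : Int) + 1)
              (1 :: fibGenB (A'.length : Int) 1 2)).1 > -1 then
            r.set i.toNat ((pullLoop r i (-1) ((A'.length : Int) + 1)
              (1 :: fibGenB (A'.length : Int) 1 2)).2 + 1)
          else r) r1).getD k 0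
        = if k < i then specF A' (fibGenB (A'.length : Int) 1 2) k else r1.getD k 0 := by
  induction i with
  | zero =>
    rw [PySem.List.pyRange_one_eq_nil (by omega)]
    refine ⟨hlen, fun k hk => ?_⟩
    rw [List.foldl_nil, if_neg (by omega)]
  | succ i ih =>
    obtain ⟨ihlen, ihval⟩ := ih (by omega)
    have hcast : ((i + 1 : Nat) : Int) = (i : Int) + 1 := by push_cast; ring
    rw [hcast, PySem.List.pyRange_one_succ_right (by omega), List.foldl_append,
      List.foldl_cons, List.foldl_nil]
    -- abbreviations
    set N : Int := (A'.length : Int) with hN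
    set fB := fibGenB N 1 2 with hfB
    set R := (PySem.List.pyRange 0 (i : Int) 1).foldl
        (fun r i =>
          if PySem.List.pyGetD A' i 0 = 0 ∨ PySem.List.pyGetD r i 0 > 0 then r
          else if (pullLoop r i (-1) (N + 1) (1 :: fB)).1 > -1 then
            r.set i.toNat ((pullLoop r i (-1) (N + 1) (1 :: fB)).2 + 1)
          else r) r1 with hR
    have hNp : 1 ≤ N := by omega
    have hfib1 : fB = 1 :: fibGenB N 2 3 := by
      rw [hfB, fibGenB, if_pos (by push_cast; omega), if_pos (by omega)]
      norm_num
    have hmemA : ∀ j ∈ (1 :: fB : List Int), 1 ≤ j ∧ j ≤ N := by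
      intro j hj
      rcases List.mem_cons.mp hj with h | h
      · omega
      · exact ⟨(fibGenB_mem 1 2 j h).1, (fibGenB_mem 1 2 j h).2⟩
    have hsortA : (1 :: fB : List Int).Pairwise (· ≤ ·) := by
      refine List.pairwise_cons.mpr ⟨fun j hj => (fibGenB_mem 1 2 j hj).1, ?_⟩
      exact (fibGenB_sorted 1 2).imp (fun h => le_of_lt h)
    have hreadav : PySem.List.pyGetD A' (i : Int) 0 = A'.getD i 0 := by
      simp
    have hreadr : PySem.List.pyGetD R (i : Int) 0 = seedV A' fB i := by
      rw [PySem.List.pyGetD_of_nonneg R 0 (by omega), Int.toNat_natCast,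
        ihval i (by omega), if_neg (by omega), hseed i (by omega)]
    have hmatch : ∀ p, p < i → R.getD p 0 = specF A' fB p := by
      intro p hp
      rw [ihval p (by omega), if_pos hp]
    have hpc : pc R (i : Int) (1 :: fB) = cl A' fB (1 :: fB) i :=
      pc_eq_cl A' fB (1 :: fB) R i (fun j hj => (hmemA j hj).1) hmatch
    have hbound : ∀ L v, v ∈ cl A' fB L i → v < N + 1 := by
      intro L v hv
      rcases mem_cl.mp hv with ⟨j, hjm, hj1, hj2, hp, rfl⟩
      have := specF_le A' fB (i - j.toNat)
      omega
    by_cases hskip : A'.getD i 0 = 0 ∨ seedV A' fB i > 0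
    · rw [hreadav, hreadr, if_pos hskip]
      refine ⟨ihlen, fun k hk => ?_⟩
      by_cases hki : k < i
      · rw [ihval k hk, if_pos hki, if_pos (by omega)]
      · by_cases hki' : k = i
        · subst hki'
          rw [ihval k hk, if_neg (by omega), if_pos (by omega), hseed k hk]
          rcases hskip with h0 | h1
          · rw [specF_eq, if_neg (by rw [hfB]; rintro ⟨h, _⟩; omega), if_pos h0]
            rw [seedV, if_neg (by rintro ⟨h, _⟩; omega)]
          · rw [seedV] at h1 ⊢
            split_ifs at h1 with hc
            · rw [if_pos hc, specF_eq, if_pos (by rw [hfB] at hc ⊢; exact hc)]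
            · omega
        · rw [ihval k hk, if_neg (by omega), if_neg (by omega)]
    · rw [hreadav, hreadr, if_neg hskip]
      rw [not_or] at hskip
      obtain ⟨hav0', hsv'⟩ := hskip
      have hskip := And.intro hav0' (by omega : ¬ seedV A' fB i > 0)
      obtain ⟨hav0, hsv⟩ := hskip
      have hnseed : ¬(A'.getD i 0 = 1 ∧ ((i : Int) + 1) ∈ fB) := by
        intro hc
        rw [seedV, if_pos hc] at hsv
        omega
      rcases hC : (cl A' fB fB i) with _ | ⟨c0, Crest⟩
      · -- no candidates: loop records nothing
        have hpcnil : pc R (i : Int) (1 :: fB) = [] := by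
          rw [hpc, hfib1]
          rw [hfib1] at hC
          exact cl_cons_one_nil A' (1 :: fibGenB N 2 3) (fibGenB N 2 3) i hC
        have hnopull := pull_no R (i : Int) (1 :: fB) hsortA (-1) (N + 1)
          (by rw [hpcnil]; intro v hv; cases hv)
        rw [hnopull]
        rw [if_neg (by norm_num)]
        refine ⟨ihlen, fun k hk => ?_⟩
        by_cases hki : k < i
        · rw [ihval k hk, if_pos hki, if_pos (by omega)]
        · by_cases hki' : k = i
          · subst hki'
            rw [ihval k hk, if_neg (by omega), if_pos (by omega), hseed k hk]
            rw [specF_eq, if_neg hnseed, if_neg hav0, hC]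
            rw [seedV, if_neg hnseed]
            rfl
          · rw [ihval k hk, if_neg (by omega), if_neg (by omega)]
      · -- some candidate: the minimum is recorded
        rcases hm : (cl A' fB fB i).min? with _ | m
        · rw [hC] at hm; cases (List.min?_eq_none_iff.mp hm)
        · have hmmem := List.min?_mem hm
          have hmlt : m < N + 1 := hbound _ _ hmmem
          have hmmemA : m ∈ cl A' fB (1 :: fB) i := by
            rcases mem_cl.mp hmmem with ⟨j, hjm, hj1, hj2, hp, hveq⟩
            exact mem_cl.mpr ⟨j, List.mem_cons_of_mem _ hjm, hj1, hj2, hp, hveq⟩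
          have hyes := pull_yes R (i : Int) (1 :: fB) hsortA (-1) (N + 1)
            ⟨m, by rw [hpc]; exact hmmemA, hmlt⟩
          have hsnd := pull_snd R (i : Int) (1 :: fB) hsortA (-1) (N + 1)
          have hsndval : (pullLoop R (i : Int) (-1) (N + 1) (1 :: fB)).2 = m := by
            rw [hsnd, hpc, hfib1, cl_cons_one, ← hfib1]
            have hbig : ∀ v ∈ cl A' fB fB i, v < N + 1 := hbound fB
            have := foldl_min_of_big (N + 1) (cl A' fB fB i) (by rw [hC]; simp) hbig
            rw [hm] at this
            exact Option.some.injEq _ _ ▸ this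
          rw [if_pos (by omega)]
          constructor
          · rw [List.length_set, ihlen]
          · intro k hk
            rw [hsndval]
            rw [getD_set_ite _ _ _ _ _ (by rw [ihlen]; omega)]
            by_cases hki : k < i
            · rw [if_neg (by omega), ihval k hk, if_pos hki, if_pos (by omega)]
            · by_cases hki' : k = i
              · subst hki'
                rw [if_pos (by omega), if_pos (by omega)]
                rw [specF_eq, if_neg hnseed, if_neg hav0, hm]
              · rw [if_neg (by omega), ihval k hk, if_neg (by omega), if_neg (by omega)]

theorem solution_eq_specF (A : List Int) :
    solution A = specF (A ++ [1]) (fibGenB (((A ++ [1]).length : Nat) : Int) 1 2)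
      ((A ++ [1]).length - 1) := by
  have hn : (A ++ [1]).length = A.length + 1 := by simp
  have hN1 : (1 : Int) ≤ (((A ++ [1]).length : Nat) : Int) := by
    rw [hn]; push_cast; omega
  rw [solution]
  rw [fibsA_eq hN1]
  -- characterize the array after loop 1
  set A' := A ++ [1] with hA'
  set N : Int := (A'.length : Int) with hNdef
  set fB := fibGenB N 1 2 with hfB
  have hmemB : ∀ j ∈ fB, 1 ≤ j ∧ j ≤ N := fun j hj => fibGenB_mem 1 2 j hj
  have hmemA : ∀ j ∈ (1 :: fB : List Int), 1 ≤ j ∧ j ≤ N := by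
    intro j hj
    rcases List.mem_cons.mp hj with h | h
    · omega
    · exact hmemB j h
  have h1B : (1 : Int) ∈ fB := one_mem_fibGenB hN1
  set r1 := (1 :: fB : List Int).foldl
    (fun r j => if PySem.List.pyGetD A' (j - 1) 0 = 1 then r.set (j - 1).toNat 1 else r)
    (List.replicate A'.length (-1)) with hr1
  have hr1len : r1.length = A'.length := by
    rw [hr1, seed_foldl_length, List.length_replicate]
  have hr1val : ∀ k, k < A'.length → r1.getD k 0 = seedV A' fB k := by
    intro k hk
    rw [hr1, seed_foldl_getD A' (1 :: fB) hmemA _ (by simp) k hk]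
    have hrep : (List.replicate A'.length (-1 : Int)).getD k 0 = -1 := by
      rw [List.getD_eq_getElem?_getD, List.getElem?_replicate, if_pos hk]
      rfl
    rw [hrep, seedV]
    have hmem_iff : (((k : Int) + 1) ∈ (1 :: fB : List Int)) ↔ (((k : Int) + 1) ∈ fB) := by
      constructor
      · intro h
        rcases List.mem_cons.mp h with h | h
        · rw [h]; exact h1B
        · exact h
      · exact List.mem_cons_of_mem _
    simp only [hmem_iff]
    by_cases hc : ((k : Int) + 1) ∈ fB ∧ A'.getD k 0 = 1
    · rw [if_pos hc, if_pos ⟨hc.2, hc.1⟩]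
    · rw [if_neg hc, if_neg (fun h => hc ⟨h.2, h.1⟩)]
  obtain ⟨h2len, h2val⟩ := loop2_inv A' (by rw [hA']; simp) r1 hr1len hr1val
    A'.length (le_refl _)
  have hr2 : (PySem.List.pyRange 0 N 1).foldl
      (fun r i =>
        if PySem.List.pyGetD A' i 0 = 0 ∨ PySem.List.pyGetD r i 0 > 0 then r
        else if (pullLoop r i (-1) (N + 1) (1 :: fB)).1 > -1 then
          r.set i.toNat ((pullLoop r i (-1) (N + 1) (1 :: fB)).2 + 1)
        else r) r1
      = (PySem.List.pyRange 0 ((A'.length : Nat) : Int) 1).foldl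
      (fun r i =>
        if PySem.List.pyGetD A' i 0 = 0 ∨ PySem.List.pyGetD r i 0 > 0 then r
        else if (pullLoop r i (-1) ((A'.length : Int) + 1) (1 :: fibGenB (A'.length : Int) 1 2)).1 > -1 then
          r.set i.toNat ((pullLoop r i (-1) ((A'.length : Int) + 1) (1 :: fibGenB (A'.length : Int) 1 2)).2 + 1)
        else r) r1 := rfl
  rw [hr2]
  set R := (PySem.List.pyRange 0 ((A'.length : Nat) : Int) 1).foldl
      (fun r i =>
        if PySem.List.pyGetD A' i 0 = 0 ∨ PySem.List.pyGetD r i 0 > 0 then r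
        else if (pullLoop r i (-1) ((A'.length : Int) + 1) (1 :: fibGenB (A'.length : Int) 1 2)).1 > -1 then
          r.set i.toNat ((pullLoop r i (-1) ((A'.length : Int) + 1) (1 :: fibGenB (A'.length : Int) 1 2)).2 + 1)
        else r) r1 with hRdef
  have hRne : R ≠ [] := by
    intro h
    have := congrArg List.length h
    rw [h2len] at this
    simp [hA'] at this
  rw [PySem.List.pyGetD_neg_one R 0 hRne, List.getLast_eq_getElem]
  have hlast := h2val (A'.length - 1) (by rw [hA']; simp)
  rw [if_pos (by rw [hA']; simp)] at hlast
  rw [← hlast, List.getD_eq_getElem?_getD, List.getElem?_eq_getElem (by rw [h2len, hA']; simp)]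
  simp [h2len]

-- ===== B side =====
-- candidates pushed into the dict for cell k after outer steps -1, 0, …, i-1
def shoreC (A' fibs : List Int) (k : Nat) : List Int :=
  if A'.getD k 0 = 1 ∧ ((k : Int) + 1) ∈ fibs then [1] else []

def interC (A' fibs : List Int) (k i : Nat) : List Int :=
  fibs.filterMap (fun j =>
    if 1 ≤ j ∧ j ≤ (k : Int) ∧ (k : Int) - j < (i : Int) ∧ A'.getD k 0 ≠ 0 then
      (if 0 < specF A' fibs (k - j.toNat) then some (specF A' fibs (k - j.toNat) + 1) else none)
    else none)

def pval (A' fibs : List Int) (k i : Nat) : Option Int :=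
  (shoreC A' fibs k ++ interC A' fibs k i).min?

theorem mem_interC {A' fibs : List Int} {k i : Nat} {v : Int} :
    v ∈ interC A' fibs k i ↔
      ∃ j ∈ fibs, 1 ≤ j ∧ j ≤ (k : Int) ∧ (k : Int) - j < (i : Int) ∧ A'.getD k 0 ≠ 0 ∧
        0 < specF A' fibs (k - j.toNat) ∧ v = specF A' fibs (k - j.toNat) + 1 := by
  constructor
  · intro hv
    rcases List.mem_filterMap.mp hv with ⟨j, hj, hjv⟩
    by_cases h : 1 ≤ j ∧ j ≤ (k : Int) ∧ (k : Int) - j < (i : Int) ∧ A'.getD k 0 ≠ 0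
    · rw [if_pos h] at hjv
      by_cases hp : 0 < specF A' fibs (k - j.toNat)
      · rw [if_pos hp] at hjv
        exact ⟨j, hj, h.1, h.2.1, h.2.2.1, h.2.2.2, hp, (Option.some.injEq _ _ ▸ hjv).symm⟩
      · rw [if_neg hp] at hjv; cases hjv
    · rw [if_neg h] at hjv; cases hjv
  · rintro ⟨j, hj, h1, h2, h3, h4, hp, rfl⟩
    refine List.mem_filterMap.mpr ⟨j, hj, ?_⟩
    rw [if_pos ⟨h1, h2, h3, h4⟩, if_pos hp]

theorem mem_shoreC {A' fibs : List Int} {k : Nat} {v : Int} :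
    v ∈ shoreC A' fibs k ↔ (A'.getD k 0 = 1 ∧ ((k : Int) + 1) ∈ fibs) ∧ v = 1 := by
  rw [shoreC]
  split_ifs with h
  · constructor
    · intro hv
      exact ⟨h, by simpa using hv⟩
    · rintro ⟨_, rfl⟩
      simp
  · constructor
    · intro hv
      simp at hv
    · rintro ⟨hc, _⟩
      exact absurd hc h

-- pushLoop: pointwise effect on the dict
theorem push_get? (A' : List Int) (N : Int) (i c : Int) (d : PySem.Dict Int Int)
    (L : List Int) (hL : L.Pairwise (· < ·)) (q : Int) :
    (pushLoop A' N i c d L).get? q =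
      if (q - i) ∈ L ∧ q < N ∧
          ((if i < 0 then PySem.List.pyGetD A' q 0 == 1 else PySem.List.pyGetD A' q 0 != 0) = true) ∧
          ((match d.get? q with | none => true | some v => decide (c < v)) = true) then
        some c
      else d.get? q := by
  induction L generalizing d with
  | nil =>
    rw [pushLoop, if_neg (by rintro ⟨h, _⟩; cases h)]
  | cons j rest ih =>
    have hrest : rest.Pairwise (· < ·) := (List.pairwise_cons.mp hL).2
    have hjlt : ∀ j' ∈ rest, j < j' := (List.pairwise_cons.mp hL).1
    rw [pushLoop]
    by_cases hbig : i + j ≥ N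
    · rw [if_pos hbig, if_neg ?_]
      rintro ⟨hmem, hlt, _⟩
      rcases List.mem_cons.mp hmem with h | h
      · omega
      · have := hjlt _ h; omega
    · rw [if_neg hbig]
      by_cases hq : q = i + j
      · subst hq
        have hqj : i + j - i = j := by omega
        have hmemno : ¬ (i + j - i) ∈ rest := by
          rw [hqj]
          intro hm
          exact absurd (hjlt _ hm) (lt_irrefl _)
        by_cases hcond : ((if i < 0 then PySem.List.pyGetD A' (i + j) 0 == 1
              else PySem.List.pyGetD A' (i + j) 0 != 0) &&
            (match d.get? (i + j) with | none => true | some v => decide (c < v))) = true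
        · rcases (Bool.and_eq_true _ _).mp hcond with ⟨hland, hbetter⟩
          rw [if_pos hcond, ih _ hrest, if_neg (fun hc => hmemno hc.1),
            PySem.Dict.get?_insert, if_pos rfl,
            if_pos ⟨by rw [hqj]; exact List.mem_cons_self, by omega, hland, hbetter⟩]
        · rw [if_neg hcond, ih _ hrest, if_neg (fun hc => hmemno hc.1),
            if_neg (fun hc => hcond ((Bool.and_eq_true _ _).mpr ⟨hc.2.2.1, hc.2.2.2⟩))]
      · have hqj : q - i ≠ j := by omega
        have hmemiff : (q - i) ∈ (j :: rest) ↔ (q - i) ∈ rest := by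
          constructor
          · intro h
            rcases List.mem_cons.mp h with h | h
            · exact absurd h hqj
            · exact h
          · exact List.mem_cons_of_mem _
        by_cases hcond : ((if i < 0 then PySem.List.pyGetD A' (i + j) 0 == 1
              else PySem.List.pyGetD A' (i + j) 0 != 0) &&
            (match d.get? (i + j) with | none => true | some v => decide (c < v))) = true
        · rw [if_pos hcond, ih _ hrest]
          have hget : (d.insert (i + j) c).get? q = d.get? q := by
            rw [PySem.Dict.get?_insert, if_neg (by omega)]
          rw [hget]
          simp only [hmemiff]
        · rw [if_neg hcond, ih _ hrest]
          simp only [hmemiff]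

theorem interC_stable (A' fibs : List Int) (k i i' : Nat) (hi : k ≤ i) (hi' : k ≤ i') :
    interC A' fibs k i = interC A' fibs k i' := by
  rw [interC, interC]
  apply List.filterMap_congr
  intro j _
  by_cases hc : 1 ≤ j ∧ j ≤ (k : Int) ∧ A'.getD k 0 ≠ 0
  · rw [if_pos (show 1 ≤ j ∧ j ≤ (k : Int) ∧ (k : Int) - j < (i : Int) ∧ A'.getD k 0 ≠ 0 from
      ⟨hc.1, hc.2.1, by omega, hc.2.2⟩)]
    rw [if_pos (show 1 ≤ j ∧ j ≤ (k : Int) ∧ (k : Int) - j < (i' : Int) ∧ A'.getD k 0 ≠ 0 from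
      ⟨hc.1, hc.2.1, by omega, hc.2.2⟩)]
  · rw [if_neg (fun h => hc ⟨h.1, h.2.1, h.2.2.2⟩), if_neg (fun h => hc ⟨h.1, h.2.1, h.2.2.2⟩)]

theorem interC_skip (A' fibs : List Int) (k i : Nat) (hspec : specF A' fibs i ≤ 0) :
    interC A' fibs k (i + 1) = interC A' fibs k i := by
  rw [interC, interC]
  apply List.filterMap_congr
  intro j _
  by_cases hc : 1 ≤ j ∧ j ≤ (k : Int) ∧ (k : Int) - j < (i : Int) ∧ A'.getD k 0 ≠ 0
  · rw [if_pos (show 1 ≤ j ∧ j ≤ (k : Int) ∧ (k : Int) - j < ((i + 1 : Nat) : Int) ∧ A'.getD k 0 ≠ 0 from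
      ⟨hc.1, hc.2.1, by push_cast; omega, hc.2.2.2⟩)]
    rw [if_pos hc]
  · by_cases hc' : 1 ≤ j ∧ j ≤ (k : Int) ∧ (k : Int) - j < ((i + 1 : Nat) : Int) ∧ A'.getD k 0 ≠ 0
    · -- boundary: k - j = i, the new predecessor; filtered out since specF i ≤ 0
      have hbound : (k : Int) - j = (i : Int) := by
        rcases hc' with ⟨h1, h2, h3, h4⟩
        push_cast at h3
        by_contra hne
        exact hc ⟨h1, h2, by omega, h4⟩
      have hnat : k - j.toNat = i := by omega
      rw [if_pos hc', if_neg hc, hnat, if_neg (show ¬ 0 < specF A' fibs i by omega)]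
    · rw [if_neg hc', if_neg hc]

theorem pval_self (A' fibs : List Int) (k : Nat) :
    pval A' fibs k k = if 1 ≤ specF A' fibs k then some (specF A' fibs k) else none := by
  rw [pval]
  by_cases c1 : A'.getD k 0 = 1 ∧ ((k : Int) + 1) ∈ fibs
  · have hv : specF A' fibs k = 1 := by rw [specF_eq, if_pos c1]
    rw [hv, if_pos (by omega)]
    apply List.min?_eq_some_iff.mpr
    constructor
    · exact List.mem_append.mpr (Or.inl (mem_shoreC.mpr ⟨c1, rfl⟩))
    · intro b hb
      rcases List.mem_append.mp hb with h | h
      · rw [(mem_shoreC.mp h).2]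
      · rcases mem_interC.mp h with ⟨j, _, _, _, _, _, hp, rfl⟩
        omega
  · have hsh : shoreC A' fibs k = [] := by rw [shoreC, if_neg c1]
    rw [hsh, List.nil_append]
    by_cases c2 : A'.getD k 0 = 0
    · have hv : specF A' fibs k = -1 := by rw [specF_eq, if_neg c1, if_pos c2]
      rw [hv, if_neg (by omega), List.min?_eq_none_iff]
      apply List.eq_nil_iff_forall_not_mem.mpr
      intro v hv'
      rcases mem_interC.mp hv' with ⟨j, _, _, _, _, h4, _⟩
      exact h4 c2
    · rcases hm : (cl A' fibs fibs k).min? with _ | m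
      · have hcl : cl A' fibs fibs k = [] := List.min?_eq_none_iff.mp hm
        have hv : specF A' fibs k = -1 := by rw [specF_eq, if_neg c1, if_neg c2, hm]
        rw [hv, if_neg (by omega), List.min?_eq_none_iff]
        apply List.eq_nil_iff_forall_not_mem.mpr
        intro v hv'
        rcases mem_interC.mp hv' with ⟨j, hjm, h1, h2, _, _, hp, rfl⟩
        have hin : specF A' fibs (k - j.toNat) ∈ cl A' fibs fibs k :=
          mem_cl.mpr ⟨j, hjm, h1, h2, hp, rfl⟩
        rw [hcl] at hin
        cases hin
      · obtain ⟨hmmem, hmmin⟩ := List.min?_eq_some_iff.mp hm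
        have hm1 : 0 < m := by
          rcases mem_cl.mp hmmem with ⟨j, _, _, _, hp, hveq⟩
          omega
        have hv : specF A' fibs k = m + 1 := by rw [specF_eq, if_neg c1, if_neg c2, hm]
        rw [hv, if_pos (by omega)]
        apply List.min?_eq_some_iff.mpr
        constructor
        · rcases mem_cl.mp hmmem with ⟨j, hjm, h1, h2, hp, hveq⟩
          exact mem_interC.mpr ⟨j, hjm, h1, h2, by omega, c2, hp, by omega⟩
        · intro b hb
          rcases mem_interC.mp hb with ⟨j, hjm, h1, h2, _, _, hp, rfl⟩
          have hin : specF A' fibs (k - j.toNat) ∈ cl A' fibs fibs k :=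
            mem_cl.mpr ⟨j, hjm, h1, h2, hp, rfl⟩
          have := hmmin _ hin
          omega

theorem interC_mono {A' fibs : List Int} {k i : Nat} {v : Int}
    (hv : v ∈ interC A' fibs k i) : v ∈ interC A' fibs k (i + 1) := by
  rcases mem_interC.mp hv with ⟨j, hjm, h1, h2, h3, h4, hp, rfl⟩
  exact mem_interC.mpr ⟨j, hjm, h1, h2, by push_cast; omega, h4, hp, rfl⟩

theorem interC_av0 (A' fibs : List Int) (k i : Nat) (hav : A'.getD k 0 = 0) :
    interC A' fibs k i = [] := by
  apply List.eq_nil_iff_forall_not_mem.mpr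
  intro v hv
  rcases mem_interC.mp hv with ⟨j, _, _, _, _, h4, _⟩
  exact h4 hav

theorem interC_zero (A' fibs : List Int) (k : Nat) : interC A' fibs k 0 = [] := by
  apply List.eq_nil_iff_forall_not_mem.mpr
  intro v hv
  rcases mem_interC.mp hv with ⟨j, _, h1, h2, h3, _⟩
  simp at h3
  omega

theorem interC_notmem (A' fibs : List Int) (k i : Nat)
    (hnm : ((k : Int) - (i : Int)) ∉ fibs) :
    interC A' fibs k (i + 1) = interC A' fibs k i := by
  rw [interC, interC]
  apply List.filterMap_congr
  intro j hj
  by_cases hc : 1 ≤ j ∧ j ≤ (k : Int) ∧ (k : Int) - j < (i : Int) ∧ A'.getD k 0 ≠ 0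
  · rw [if_pos (show 1 ≤ j ∧ j ≤ (k : Int) ∧ (k : Int) - j < ((i + 1 : Nat) : Int) ∧ A'.getD k 0 ≠ 0 from
      ⟨hc.1, hc.2.1, by push_cast; omega, hc.2.2.2⟩), if_pos hc]
  · by_cases hc' : 1 ≤ j ∧ j ≤ (k : Int) ∧ (k : Int) - j < ((i + 1 : Nat) : Int) ∧ A'.getD k 0 ≠ 0
    · exfalso
      have hbound : (k : Int) - j = (i : Int) := by
        rcases hc' with ⟨h1, h2, h3, h4⟩
        push_cast at h3
        by_contra hne
        exact hc ⟨h1, h2, by omega, h4⟩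
      apply hnm
      rw [show (k : Int) - (i : Int) = j by omega]
      exact hj
    · rw [if_neg hc', if_neg hc]

theorem interC_succ_mem {A' fibs : List Int} {k i : Nat} {v : Int}
    (hv : v ∈ interC A' fibs k (i + 1)) :
    v ∈ interC A' fibs k i ∨
      (((k : Int) - (i : Int)) ∈ fibs ∧ 1 ≤ (k : Int) - (i : Int) ∧ A'.getD k 0 ≠ 0 ∧
        0 < specF A' fibs i ∧ v = specF A' fibs i + 1) := by
  rcases mem_interC.mp hv with ⟨j, hjm, h1, h2, h3, h4, hp, rfl⟩
  push_cast at h3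
  by_cases hb : (k : Int) - j = (i : Int)
  · right
    have hnat : k - j.toNat = i := by omega
    rw [hnat] at hp ⊢
    exact ⟨by rw [show (k : Int) - (i : Int) = j by omega]; exact hjm, by omega, h4, hp, rfl⟩
  · left
    exact mem_interC.mpr ⟨j, hjm, h1, h2, by omega, h4, hp, rfl⟩

theorem loopB_inv (A' : List Int) (hA : A'.length ≠ 0) (i : Nat) (hi : i ≤ A'.length) :
    ∀ q : Int,
      ((PySem.List.pyRange (-1) (i : Int) 1).foldl
        (fun d i => match d.get? i with
          | none => d
          | some bi => pushLoop A' ((A'.length : Nat) : Int) i (bi + 1) d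
              (fibGenB ((A'.length : Nat) : Int) 1 2))
        (PySem.Dict.ofList [(-1, 0)])).get? q
      = if q = -1 then some 0
        else if 0 ≤ q ∧ q < ((A'.length : Nat) : Int) then
          pval A' (fibGenB ((A'.length : Nat) : Int) 1 2) q.toNat i
        else none := by
  set N : Int := ((A'.length : Nat) : Int) with hN
  set fB := fibGenB N 1 2 with hfB
  have hNp : 1 ≤ N := by omega
  have hmemB : ∀ j ∈ fB, 1 ≤ j ∧ j ≤ N := fun j hj => fibGenB_mem 1 2 j hj
  have hsortB : fB.Pairwise (· < ·) := fibGenB_sorted 1 2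
  have hd0 : ∀ q : Int, (PySem.Dict.ofList [((-1 : Int), (0 : Int))]).get? q
      = if q = -1 then some 0 else none := by
    intro q
    rw [show (PySem.Dict.ofList [((-1 : Int), (0 : Int))]) = (PySem.Dict.empty.insert (-1) 0) from rfl,
      PySem.Dict.get?_insert, PySem.Dict.get?_empty]
  induction i with
  | zero =>
    intro q
    rw [show ((0 : Nat) : Int) = 0 by rfl, PySem.List.pyRange_one_cons (by omega),
      PySem.List.pyRange_one_eq_nil (by omega), List.foldl_cons, List.foldl_nil]
    have h1 : (PySem.Dict.ofList [((-1 : Int), (0 : Int))]).get? (-1) = some 0 := by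
      rw [hd0]
      simp
    rw [h1]
    change (pushLoop A' N (-1) ((0 : Int) + 1) (PySem.Dict.ofList [(-1, 0)]) fB).get? q = _
    rw [push_get? A' N (-1) (0 + 1) _ fB hsortB q]
    by_cases hq1 : q = -1
    · subst hq1
      rw [if_neg (by rintro ⟨hm, _⟩; have := hmemB _ hm; omega), hd0, if_pos rfl, if_pos rfl]
    · by_cases hq2 : 0 ≤ q ∧ q < N
      · have hql : q.toNat < A'.length := by omega
        have hqk : q = ((q.toNat : Nat) : Int) := by omega
        rw [if_neg hq1, if_pos hq2, pval, interC_zero, List.append_nil]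
        by_cases hsc : A'.getD q.toNat 0 = 1 ∧ ((q.toNat : Int) + 1) ∈ fB
        · rw [if_pos ?_]
          · rw [shoreC, if_pos hsc]
            rfl
          · refine ⟨by rw [show q - -1 = (q.toNat : Int) + 1 by omega]; exact hsc.2, hq2.2, ?_, ?_⟩
            · rw [if_pos (by omega : (-1 : Int) < 0)]
              rw [PySem.List.pyGetD_of_nonneg A' 0 (by omega)]
              exact beq_iff_eq.mpr hsc.1
            · rw [hd0, if_neg hq1]
        · rw [if_neg ?_]
          · rw [hd0, if_neg hq1, shoreC, if_neg hsc]
            rfl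
          · rintro ⟨hm, _, hland, _⟩
            apply hsc
            refine ⟨?_, by rw [show (q.toNat : Int) + 1 = q - -1 by omega]; exact hm⟩
            rw [if_pos (by omega : (-1 : Int) < 0)] at hland
            rw [PySem.List.pyGetD_of_nonneg A' 0 (by omega)] at hland
            exact beq_iff_eq.mp hland
      · rw [if_neg hq1, if_neg hq2]
        rw [if_neg ?_, hd0, if_neg hq1]
        rintro ⟨hm, hlt, _⟩
        have := hmemB _ hm
        omega
  | succ i ih =>
    have ihq := ih (by omega)
    intro q
    have hcast : ((i + 1 : Nat) : Int) = (i : Int) + 1 := by push_cast; ring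
    rw [hcast, PySem.List.pyRange_one_succ_right (by omega), List.foldl_append,
      List.foldl_cons, List.foldl_nil]
    set D := (PySem.List.pyRange (-1) (i : Int) 1).foldl
        (fun d i => match d.get? i with
          | none => d
          | some bi => pushLoop A' N i (bi + 1) d fB)
        (PySem.Dict.ofList [(-1, 0)]) with hD
    have hDi : D.get? (i : Int) = pval A' fB i i := by
      rw [ihq (i : Int), if_neg (by omega), if_pos (by constructor <;> omega), Int.toNat_natCast]
    rw [pval_self] at hDi
    by_cases hskip : 1 ≤ specF A' fB i
    · -- i is reachable: push from it
      rw [hDi, if_pos hskip]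
      change (pushLoop A' N (i : Int) (specF A' fB i + 1) D fB).get? q = _
      rw [push_get? A' N (i : Int) (specF A' fB i + 1) D fB hsortB q]
      by_cases hq1 : q = -1
      · subst hq1
        rw [if_neg (by rintro ⟨hm, _⟩; have := hmemB _ hm; omega), ihq, if_pos rfl, if_pos rfl]
      · by_cases hq2 : 0 ≤ q ∧ q < N
        · have hql : q.toNat < A'.length := by omega
          have hqk : q = ((q.toNat : Nat) : Int) := by omega
          rw [if_neg hq1, if_pos hq2]
          have hDq : D.get? q = pval A' fB q.toNat i := by
            rw [ihq, if_neg hq1, if_pos hq2]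
          by_cases hcond : (q - (i : Int)) ∈ fB ∧
              A'.getD q.toNat 0 ≠ 0 ∧
              (match D.get? q with
                | none => true
                | some v => decide (specF A' fB i + 1 < v)) = true
          · -- the push lands and improves: new minimum is specF i + 1
            obtain ⟨hjm, hav, hbetter⟩ := hcond
            have hj1 : 1 ≤ q - (i : Int) := (hmemB _ hjm).1
            rw [if_pos ?_]
            swap
            · refine ⟨hjm, hq2.2, ?_, hbetter⟩
              rw [if_neg (by omega : ¬ (i : Int) < 0)]
              rw [PySem.List.pyGetD_of_nonneg A' 0 (by omega)]
              exact bne_iff_ne.mpr hav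
            symm
            apply List.min?_eq_some_iff.mpr
            constructor
            · apply List.mem_append.mpr
              right
              refine mem_interC.mpr ⟨q - (i : Int), hjm, hj1, by omega, by push_cast; omega, hav,
                ?_, ?_⟩
              · rw [show q.toNat - (q - (i : Int)).toNat = i by omega]
                omega
              · rw [show q.toNat - (q - (i : Int)).toNat = i by omega]
            · intro b hb
              rcases List.mem_append.mp hb with h | h
              · -- shore candidate 1 present: then the old value was ≤ 1 and better fails
                exfalso
                obtain ⟨hsc, hb1⟩ := mem_shoreC.mp h
                have h1mem : (1 : Int) ∈ shoreC A' fB q.toNat ++ interC A' fB q.toNat i :=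
                  List.mem_append.mpr (Or.inl (mem_shoreC.mpr ⟨hsc, rfl⟩))
                rcases hv0 : pval A' fB q.toNat i with _ | v0
                · rw [pval, List.min?_eq_none_iff] at hv0
                  rw [hv0] at h1mem
                  cases h1mem
                · have hpv : (shoreC A' fB q.toNat ++ interC A' fB q.toNat i).min? = some v0 := hv0
                  obtain ⟨_, hmin⟩ := List.min?_eq_some_iff.mp hpv
                  have h1le := hmin _ h1mem
                  rw [hDq, hv0] at hbetter
                  have := of_decide_eq_true hbetter
                  omega
              · rcases interC_succ_mem h with h' | ⟨_, _, _, _, rfl⟩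
                · -- an old candidate: the old min was ≤ it, and better says c < old min
                  have hbm : b ∈ shoreC A' fB q.toNat ++ interC A' fB q.toNat i :=
                    List.mem_append.mpr (Or.inr h')
                  rcases hv0 : pval A' fB q.toNat i with _ | v0
                  · rw [pval, List.min?_eq_none_iff] at hv0
                    rw [hv0] at hbm
                    cases hbm
                  · have hpv : (shoreC A' fB q.toNat ++ interC A' fB q.toNat i).min? = some v0 := hv0
                    obtain ⟨_, hmin⟩ := List.min?_eq_some_iff.mp hpv
                    have := hmin _ hbm
                    rw [hDq, hv0] at hbetter
                    have := of_decide_eq_true hbetter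
                    omega
                · omega
          · -- no improving push to q: value unchanged
            rw [if_neg ?_]
            swap
            · rintro ⟨hm, _, hland, hbetter⟩
              apply hcond
              refine ⟨hm, ?_, hbetter⟩
              rw [if_neg (by omega : ¬ (i : Int) < 0)] at hland
              rw [PySem.List.pyGetD_of_nonneg A' 0 (by omega)] at hland
              exact bne_iff_ne.mp hland
            rw [hDq]
            -- show pval q.toNat (i+1) = pval q.toNat i
            by_cases ha : (q - (i : Int)) ∈ fB
            · by_cases hb : A'.getD q.toNat 0 ≠ 0
              · -- better must fail: old value some v0 with v0 ≤ c
                rcases hv0 : pval A' fB q.toNat i with _ | v0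
                · exfalso
                  apply hcond
                  refine ⟨ha, hb, ?_⟩
                  rw [hDq, hv0]
                · have hpv : (shoreC A' fB q.toNat ++ interC A' fB q.toNat i).min? = some v0 := hv0
                  obtain ⟨hv0mem, hv0min⟩ := List.min?_eq_some_iff.mp hpv
                  have hv0c : v0 ≤ specF A' fB i + 1 := by
                    by_contra hlt
                    apply hcond
                    refine ⟨ha, hb, ?_⟩
                    rw [hDq, hv0]
                    exact decide_eq_true (by omega)
                  symm
                  rw [pval]
                  apply List.min?_eq_some_iff.mpr
                  constructor
                  · rcases List.mem_append.mp hv0mem with h | h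
                    · exact List.mem_append.mpr (Or.inl h)
                    · exact List.mem_append.mpr (Or.inr (interC_mono h))
                  · intro b hb'
                    rcases List.mem_append.mp hb' with h | h
                    · exact hv0min _ (List.mem_append.mpr (Or.inl h))
                    · rcases interC_succ_mem h with h' | ⟨_, _, _, _, rfl⟩
                      · exact hv0min _ (List.mem_append.mpr (Or.inr h'))
                      · omega
              · -- cell q is not a leaf: no candidates at all ever
                rw [not_not] at hb
                rw [pval, pval, interC_av0 _ _ _ _ hb, interC_av0 _ _ _ _ hb]
            · -- the needed jump length is not a Fibonacci number
              rw [pval, pval, interC_notmem A' fB q.toNat i (by rw [hqk] at ha; exact ha)]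
        · rw [if_neg hq1, if_neg hq2]
          rw [if_neg ?_, ihq, if_neg hq1, if_neg hq2]
          rintro ⟨hm, hlt, _⟩
          have := hmemB _ hm
          omega
    · -- i is not reachable: dict unchanged, and no new candidates appear
      have hle : specF A' fB i ≤ 0 := by omega
      rw [hDi, if_neg hskip]
      change D.get? q = _
      rw [ihq q]
      by_cases hq1 : q = -1
      · rw [if_pos hq1, if_pos hq1]
      · by_cases hq2 : 0 ≤ q ∧ q < N
        · rw [if_neg hq1, if_pos hq2, if_neg hq1, if_pos hq2, pval, pval,
            interC_skip A' fB q.toNat i hle]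
        · rw [if_neg hq1, if_neg hq2, if_neg hq1, if_neg hq2]

theorem solution_eq_alt (A : List Int) : solution A = solution_alt A := by
  rw [solution_eq_specF, solution_alt]
  set A' := A ++ [1] with hA'
  have hlen : A'.length ≠ 0 := by rw [hA']; simp
  have hinv := loopB_inv A' hlen A'.length (le_refl _) (((A'.length : Nat) : Int) - 1)
  rw [hinv]
  rw [if_neg (by omega), if_pos ⟨by omega, by omega⟩]
  have ht : (((A'.length : Nat) : Int) - 1).toNat = A'.length - 1 := by omega
  rw [ht]
  have hstab : pval A' (fibGenB ((A'.length : Nat) : Int) 1 2) (A'.length - 1) A'.length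
      = pval A' (fibGenB ((A'.length : Nat) : Int) 1 2) (A'.length - 1) (A'.length - 1) := by
    rw [pval, pval,
      interC_stable A' (fibGenB ((A'.length : Nat) : Int) 1 2) (A'.length - 1) A'.length
        (A'.length - 1) (by omega) (le_refl _)]
  rw [hstab, pval_self]
  rcases specF_cases A' (fibGenB ((A'.length : Nat) : Int) 1 2) (A'.length - 1) with h | h
  · rw [if_neg (by omega), h]
    rfl
  · rw [if_pos h]
    rfl


-- ===== VERDICT (by name: the statement is the Claim_ definition above) =====
theorem solution_spec : Claim_equal_solution := by
  intro A _
  exact solution_eq_alt A
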